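-- pv_equiv track=rewrite | github.com/CarlosKC26/PhishingCol | domain/utils.py | split_subdomains
-- ===== SOURCE A (Python) =====
-- def split_subdomains(domain: str, registrable_domain: str) -> list[str]:
--     if domain == registrable_domain:
--         return []
--     suffix = f".{registrable_domain}"
--     if not domain.endswith(suffix):
--         return []
--     prefix = domain[: -len(suffix)]
--     return [label for label in prefix.split(".") if label]
-- ===== SOURCE B (Python) =====
-- def split_subdomains(domain: str, registrable_domain: str) -> list[str]:
--     d = domain.split(".")
--     r = registrable_domain.split(".")
--     if len(d) <= len(r):
--         return []
--     k = len(d) - len(r)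
--     if d[k:] != r:
--         return []
--     return [label for label in d[:k] if label]
-- ===== Notes on version B (the rewrite author's own statement) =====
-- stated objective: alternative
-- what changed: B splits both strings into label lists up front and compares label-list tails (length check + tail equality), instead of A's string endswith test followed by negative slicing and a later split.
import Mathlib
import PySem

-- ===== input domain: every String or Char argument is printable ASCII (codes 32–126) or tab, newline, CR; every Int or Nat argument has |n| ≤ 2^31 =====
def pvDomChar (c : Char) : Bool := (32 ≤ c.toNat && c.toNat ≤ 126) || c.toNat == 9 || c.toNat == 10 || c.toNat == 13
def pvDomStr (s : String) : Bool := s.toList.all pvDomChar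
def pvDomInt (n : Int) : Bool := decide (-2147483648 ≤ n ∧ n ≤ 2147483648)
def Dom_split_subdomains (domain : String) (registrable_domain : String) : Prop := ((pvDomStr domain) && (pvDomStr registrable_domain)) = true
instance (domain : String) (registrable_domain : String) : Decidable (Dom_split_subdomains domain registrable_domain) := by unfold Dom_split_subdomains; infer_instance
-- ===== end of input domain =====

-- B parses both strings into label lists up front and compares label-list tails instead of
-- A's endswith-then-slice-then-split; alternative decomposition, same cost, proved equal everywhere.


-- ===== PORT A =====
-- literal transliteration of A: equality test, endswith '.'+reg, negative slice, split, filter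
def split_subdomains (domain : String) (registrable_domain : String) : List String :=
  if domain = registrable_domain then []
  else
    -- suffix = f".{registrable_domain}"
    let suffix : List Char := '.' :: registrable_domain.toList
    if ¬ (PySem.Chars.endswith domain.toList suffix) then []
    else
      -- prefix = domain[: -len(suffix)]
      let pre : List Char := PySem.Chars.slice domain.toList none (some (-(suffix.length : Int)))
      -- [label for label in prefix.split(".") if label]
      ((PySem.Chars.splitOn pre ['.']).filter (fun l => !l.isEmpty)).map String.ofList

-- ===== PORT B =====
-- literal transliteration of B: split both on '.', length check, label-tail comparison, prefix filter
-- (d[k:] / d[:k] with 0 ≤ k ≤ len d are List.drop k / List.take k — exact per PySem.List.slice_from_natCast / slice_to_natCast)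
def split_subdomains_alt (domain : String) (registrable_domain : String) : List String :=
  let d := PySem.Chars.splitOn domain.toList ['.']
  let r := PySem.Chars.splitOn registrable_domain.toList ['.']
  if d.length ≤ r.length then []
  else
    let k := d.length - r.length
    if List.drop k d ≠ r then []
    else ((List.take k d).filter (fun l => !l.isEmpty)).map String.ofList

-- ===== PRECONDITION & SPEC =====
def Spec_split_subdomains (domain : String) (registrable_domain : String) (out : List String) : Prop := out = split_subdomains_alt domain registrable_domain
instance (domain : String) (registrable_domain : String) (out : List String) : Decidable (Spec_split_subdomains domain registrable_domain out) := by unfold Spec_split_subdomains; infer_instance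

-- ===== CLAIM (what is proved, stated in full; the proofs are below) =====
def Claim_equal_split_subdomains : Prop := ∀ (domain : String) (registrable_domain : String), Dom_split_subdomains domain registrable_domain → Spec_split_subdomains domain registrable_domain (split_subdomains domain registrable_domain)

-- ===== LEMMAS AND PROOFS =====

-- simple structural model of splitOn on a single-character separator
def sp (c : Char) : List Char → List Char → List (List Char)
  | [], cur => [cur.reverse]
  | x :: rest, cur => if x = c then cur.reverse :: sp c rest [] else sp c rest (x :: cur)

theorem go_eq_sp (c : Char) (fuel : Nat) (l cur : List Char) (acc : List (List Char))
    (h : l.length < fuel) :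
    PySem.Chars.splitOn.go [c] fuel l cur acc = acc.reverse ++ sp c l cur := by
  induction fuel generalizing l cur acc with
  | zero => omega
  | succ n ih =>
    cases l with
    | nil => simp [PySem.Chars.splitOn.go, sp]
    | cons x rest =>
      by_cases hx : x = c
      · subst hx
        simp only [PySem.Chars.splitOn.go, List.isPrefixOf, BEq.rfl, Bool.true_and,
          if_pos, List.length_cons, List.length_nil, Nat.zero_add, List.drop_succ_cons,
          List.drop_zero]
        rw [ih rest [] (cur.reverse :: acc) (by simp at h ⊢; omega)]
        simp [sp]
      · have hbeq : ([c].isPrefixOf (x :: rest)) = false := by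
          simp [List.isPrefixOf]
          exact fun hh => (hx hh.symm).elim
        simp only [PySem.Chars.splitOn.go, hbeq, if_neg, Bool.false_eq_true, not_false_iff]
        rw [ih rest (x :: cur) acc (by simp at h ⊢; omega)]
        simp [sp, hx]

theorem splitOn_eq_sp (c : Char) (l : List Char) :
    PySem.Chars.splitOn l [c] = sp c l [] := by
  unfold PySem.Chars.splitOn
  rw [go_eq_sp c (l.length + 1) l [] [] (by omega)]
  simp

theorem sp_ne_nil (c : Char) (l cur : List Char) : sp c l cur ≠ [] := by
  induction l generalizing cur with
  | nil => simp [sp]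
  | cons x rest ih =>
    by_cases hx : x = c
    · simp [sp, hx]
    · simpa [sp, hx] using ih (x :: cur)

theorem sp_append (c : Char) (a b cur : List Char) :
    sp c (a ++ c :: b) cur = sp c a cur ++ sp c b [] := by
  induction a generalizing cur with
  | nil => simp [sp]
  | cons x rest ih => by_cases hx : x = c <;> simp [sp, hx, ih]

-- join with separator c (inverse of sp)
def jn (c : Char) : List (List Char) → List Char
  | [] => []
  | [x] => x
  | x :: y :: rest => x ++ c :: jn c (y :: rest)

theorem jn_sp (c : Char) (l cur : List Char) : jn c (sp c l cur) = cur.reverse ++ l := by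
  induction l generalizing cur with
  | nil => simp [sp, jn]
  | cons x rest ih =>
    by_cases hx : x = c
    · simp only [sp, if_pos hx]
      obtain ⟨y, ys, hys⟩ : ∃ y ys, sp c rest [] = y :: ys := by
        cases hsp : sp c rest [] with
        | nil => exact absurd hsp (sp_ne_nil c rest [])
        | cons y ys => exact ⟨y, ys, rfl⟩
      rw [hys, jn]
      rw [← hys, ih []]
      simp [hx]
    · simp only [sp, hx, if_false]
      rw [ih (x :: cur)]
      simp

theorem jn_append (c : Char) (q r : List (List Char)) (hq : q ≠ []) (hr : r ≠ []) :
    jn c (q ++ r) = jn c q ++ c :: jn c r := by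
  induction q with
  | nil => exact absurd rfl hq
  | cons x q' ih =>
    cases q' with
    | nil =>
      cases r with
      | nil => exact absurd rfl hr
      | cons y ys => simp [jn]
    | cons z zs =>
      have := ih (by simp)
      simp only [List.cons_append, jn] at this ⊢
      rw [this]
      simp

theorem split_case_eq (domain registrable_domain : String)
    (p : List Char) (hp : domain.toList = p ++ '.' :: registrable_domain.toList) :
    split_subdomains domain registrable_domain = split_subdomains_alt domain registrable_domain := by
  have hne : domain ≠ registrable_domain := by
    intro h; subst h
    have := congrArg List.length hp
    simp at this; omega
  have hend : PySem.Chars.endswith domain.toList ('.' :: registrable_domain.toList) = true := by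
    rw [PySem.Chars.endswith_iff]
    exact ⟨p, hp.symm⟩
  unfold split_subdomains split_subdomains_alt
  rw [if_neg hne]
  rw [if_neg (not_not_intro hend)]
  have hdl : (p ++ '.' :: registrable_domain.toList).length
      = p.length + (registrable_domain.toList.length + 1) := by
    simp only [List.length_append, List.length_cons]
  -- A's prefix slice is exactly p
  have hslice : PySem.Chars.slice (p ++ '.' :: registrable_domain.toList) none
      (some (-((('.' :: registrable_domain.toList).length : Nat) : Int))) = p := by
    rw [PySem.Chars.slice_eq_listSlice,
      PySem.List.slice_to_neg_natCast _ _ (by simp)]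
    rw [hdl]
    simp only [List.length_cons]
    rw [show p.length + (registrable_domain.toList.length + 1) - (registrable_domain.toList.length + 1) = p.length by omega]
    exact List.take_left
  simp only [hp, splitOn_eq_sp, sp_append, hslice]
  -- B's guards
  have hlen : ¬ ((sp '.' p [] ++ sp '.' registrable_domain.toList []).length
      ≤ (sp '.' registrable_domain.toList []).length) := by
    have := sp_ne_nil '.' p []
    simp only [List.length_append]
    have : 0 < (sp '.' p []).length := List.length_pos_of_ne_nil this
    omega
  rw [if_neg hlen]
  simp

theorem split_case_ne (domain registrable_domain : String)
    (hend : PySem.Chars.endswith domain.toList ('.' :: registrable_domain.toList) = false) :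
    split_subdomains_alt domain registrable_domain = [] := by
  unfold split_subdomains_alt
  rw [splitOn_eq_sp, splitOn_eq_sp]
  set D := sp '.' domain.toList [] with hD
  set R := sp '.' registrable_domain.toList [] with hR
  by_cases hlen : D.length ≤ R.length
  · rw [if_pos hlen]
  · rw [if_neg hlen]
    by_cases hdrop : List.drop (D.length - R.length) D = R
    · exfalso
      have hq : List.take (D.length - R.length) D ++ R = D := by
        conv_rhs => rw [← List.take_append_drop (D.length - R.length) D]
        rw [hdrop]
      have hqne : List.take (D.length - R.length) D ≠ [] := by
        intro h
        have := congrArg List.length hq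
        rw [h] at this
        simp at this
        omega
      have hdom : domain.toList = jn '.' D := by rw [hD, jn_sp]; simp
      have hreg : registrable_domain.toList = jn '.' R := by rw [hR, jn_sp]; simp
      have hjn : jn '.' D = jn '.' (List.take (D.length - R.length) D) ++ '.' :: jn '.' R := by
        conv_lhs => rw [← hq]
        exact jn_append '.' _ _ hqne (by rw [hR]; exact sp_ne_nil _ _ _)
      have hsd : domain.toList = jn '.' (List.take (D.length - R.length) D) ++ '.' :: registrable_domain.toList := by
        rw [hdom, hjn, ← hreg]
      have : PySem.Chars.endswith domain.toList ('.' :: registrable_domain.toList) = true := by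
        rw [PySem.Chars.endswith_iff]
        exact ⟨_, hsd.symm⟩
      rw [this] at hend; exact absurd hend (by decide)
    · rw [if_pos hdrop]

-- ===== VERDICT (by name: the statement is the Claim_ definition above) =====
theorem split_subdomains_spec : Claim_equal_split_subdomains := by
  intro domain registrable_domain _
  unfold Spec_split_subdomains
  by_cases hend : PySem.Chars.endswith domain.toList ('.' :: registrable_domain.toList) = true
  · rw [PySem.Chars.endswith_iff] at hend
    obtain ⟨p, hp⟩ := hend
    exact (split_case_eq domain registrable_domain p hp.symm).symm ▸ rfl
  · have hend' := Bool.eq_false_iff.mpr hend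
    rw [split_case_ne domain registrable_domain hend']
    unfold split_subdomains
    by_cases hne : domain = registrable_domain
    · rw [if_pos hne]
    · rw [if_neg hne]
      rw [if_pos (by simp [hend'])]
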